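-- pv_equiv track=rewrite | github.com/mmakos/songbook-service | songbook_converter/song.py | __get_line_begin_tabs
-- ===== SOURCE A (Python) =====
-- def __get_line_begin_tabs(line: str) -> str:
--     tabs = str()
--     for c in line:
--         if c == '\t':
--             tabs += '\t'
--         else:
--             return tabs
--     return tabs
-- ===== SOURCE B (Python) =====
-- def __get_line_begin_tabs(line: str) -> str:
--     count = len(line) - len(line.lstrip('\t'))
--     return '\t' * count
-- ===== Notes on version B (the rewrite author's own statement) =====
-- stated objective: simpler
-- what changed: Replaces the explicit per-character loop with string accumulator by measuring the length difference after stripping leading tabs and rebuilding the prefix with string repetition.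
import Mathlib
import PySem

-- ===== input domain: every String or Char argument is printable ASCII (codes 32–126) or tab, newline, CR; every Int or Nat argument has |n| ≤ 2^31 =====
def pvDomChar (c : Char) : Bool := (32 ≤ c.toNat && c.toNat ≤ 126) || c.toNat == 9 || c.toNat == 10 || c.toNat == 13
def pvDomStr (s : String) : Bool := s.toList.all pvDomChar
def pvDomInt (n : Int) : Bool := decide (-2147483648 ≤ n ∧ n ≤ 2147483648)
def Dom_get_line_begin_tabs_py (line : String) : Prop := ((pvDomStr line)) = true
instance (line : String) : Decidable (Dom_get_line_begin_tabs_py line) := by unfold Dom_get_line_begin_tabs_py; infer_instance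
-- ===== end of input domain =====

-- B replaces A's per-character accumulator loop by measuring the lstrip('\t') length difference
-- and rebuilding the prefix with string repetition (simpler decomposition, no loop).

-- ===== PORT A =====
-- A's loop: walk the characters, appending '\t' to the accumulator, returning early on a non-tab.
def get_line_begin_tabs_py_go (tabs : List Char) : List Char → List Char
  | [] => tabs
  | c :: rest => if c = '\t' then get_line_begin_tabs_py_go (tabs ++ ['\t']) rest else tabs

def get_line_begin_tabs_py (line : String) : String :=
  String.mk (get_line_begin_tabs_py_go [] line.toList)

-- ===== PORT B =====
-- line.lstrip('\t') is exactly dropWhile (· == '\t') on the characters (ported by hand, exact);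
-- '\t' * count is List.replicate.
def get_line_begin_tabs_py_alt (line : String) : String :=
  let count := line.toList.length - (line.toList.dropWhile (· == '\t')).length
  String.mk (List.replicate count '\t')

-- ===== PRECONDITION & SPEC =====
def Spec_get_line_begin_tabs_py (line : String) (out : String) : Prop := out = get_line_begin_tabs_py_alt line
instance (line : String) (out : String) : Decidable (Spec_get_line_begin_tabs_py line out) := by unfold Spec_get_line_begin_tabs_py; infer_instance

-- ===== CLAIM (what is proved, stated in full; the proofs are below) =====
def Claim_equal_get_line_begin_tabs_py : Prop := ∀ (line : String), Dom_get_line_begin_tabs_py line → Spec_get_line_begin_tabs_py line (get_line_begin_tabs_py line)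

-- ===== LEMMAS AND PROOFS =====
theorem go_eq_append_replicate (cs tabs : List Char) :
    get_line_begin_tabs_py_go tabs cs
      = tabs ++ List.replicate (cs.length - (cs.dropWhile (· == '\t')).length) '\t' := by
  induction cs generalizing tabs with
  | nil => simp [get_line_begin_tabs_py_go]
  | cons c rest ih =>
    by_cases h : c = '\t'
    · have hle : (rest.dropWhile (· == '\t')).length ≤ rest.length :=
        List.length_dropWhile_le _ _
      simp only [get_line_begin_tabs_py_go, ih, h, List.dropWhile_cons,
        BEq.rfl, if_pos]
      have : rest.length + 1 - (rest.dropWhile (· == '\t')).length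
          = (rest.length - (rest.dropWhile (· == '\t')).length) + 1 := by omega
      simp [List.length_cons, this, List.replicate_succ, List.append_assoc]
    · simp [get_line_begin_tabs_py_go, h]

-- ===== VERDICT (by name: the statement is the Claim_ definition above) =====
theorem get_line_begin_tabs_py_spec : Claim_equal_get_line_begin_tabs_py := by
  intro line _
  unfold Spec_get_line_begin_tabs_py get_line_begin_tabs_py get_line_begin_tabs_py_alt
  rw [go_eq_append_replicate]
  simp
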